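-- pv_equiv track=rewrite | github.com/Neil-Do/HUS-Python | Tuan3/Problem8.py | setInveredIndex
-- ===== SOURCE A (Python) =====
-- def setInveredIndex(arr_s):
--     invertedIndex = {}
--     for i in range(len(arr_s)):
--         for c in arr_s[i]:
--             if c not in invertedIndex:
--                 invertedIndex[c] = [i]
--             else:
--                 if i not in invertedIndex[c]:
--                     invertedIndex[c].append(i)
--     return invertedIndex
-- ===== SOURCE B (Python) =====
-- def setInveredIndex(arr_s):
--     # char-major rebuild: first collect keys in first-appearance order, then
--     # scan all documents per key
--     keys = dict.fromkeys(c for s in arr_s for c in s)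
--     return {c: [i for i in range(len(arr_s)) if c in arr_s[i]] for c in keys}
-- ===== Notes on version B (the rewrite author's own statement) =====
-- stated objective: faster
-- what changed: A builds the dict doc-major in one incremental pass, re-scanning the growing posting list ('i not in invertedIndex[c]') for every character occurrence; B first collects the distinct characters in first-appearance order, then builds each key's posting list by one char-major membership scan over the documents, with no per-occurrence list scan.
import Mathlib
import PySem

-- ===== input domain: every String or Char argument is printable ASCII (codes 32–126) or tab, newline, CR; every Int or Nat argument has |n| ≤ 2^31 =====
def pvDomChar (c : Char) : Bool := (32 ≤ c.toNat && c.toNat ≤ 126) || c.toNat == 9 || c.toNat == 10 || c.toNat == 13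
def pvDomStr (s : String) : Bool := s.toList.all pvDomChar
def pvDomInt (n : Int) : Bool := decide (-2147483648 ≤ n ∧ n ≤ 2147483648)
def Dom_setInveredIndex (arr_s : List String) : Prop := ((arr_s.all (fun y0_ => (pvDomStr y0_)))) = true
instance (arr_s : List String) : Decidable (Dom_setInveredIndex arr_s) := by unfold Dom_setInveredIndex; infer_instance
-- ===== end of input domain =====

-- B rebuilds the index char-major (collect distinct keys first, then one membership
-- scan over the docs per key), replacing A's doc-major incremental build whose
-- per-occurrence 'i not in invertedIndex[c]' rescans make it slow on repeated chars.

-- a Python char is a 1-character string; both ports use this key conversion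
def pvKey (c : Char) : String := String.ofList [c]

-- ===== PORT A =====
-- body of A's inner 'for c in arr_s[i]' loop
def setIIStep (i : Int) (invertedIndex : PySem.Dict String (List Int)) (c : Char) :
    PySem.Dict String (List Int) :=
  if invertedIndex.contains (pvKey c) = false then
    invertedIndex.insert (pvKey c) [i]
  else
    let l := invertedIndex.getD (pvKey c) []
    if i ∈ l then invertedIndex else invertedIndex.insert (pvKey c) (l ++ [i])

def setInveredIndex (arr_s : List String) : List (String × List Int) :=
  ((PySem.List.pyRange 0 (PySem.List.len arr_s) 1).foldl (fun invertedIndex i =>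
      -- arr_s[i]: i ∈ range(len(arr_s)), so the index is always valid and pyGetD is exact
      (PySem.List.pyGetD arr_s i "").toList.foldl (setIIStep i) invertedIndex)
    PySem.Dict.empty).items

-- ===== PORT B =====
def setInveredIndex_alt (arr_s : List String) : List (String × List Int) :=
  let keys := PySem.List.dedup (arr_s.flatMap (fun s => s.toList.map pvKey))
  keys.map (fun c => (c,
    (PySem.List.pyRange 0 (PySem.List.len arr_s) 1).filter
      (fun i => PySem.Str.isIn c (PySem.List.pyGetD arr_s i ""))))

-- ===== PRECONDITION & SPEC =====
def Spec_setInveredIndex (arr_s : List String) (out : List (String × List Int)) : Prop := out = setInveredIndex_alt arr_s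
instance (arr_s : List String) (out : List (String × List Int)) : Decidable (Spec_setInveredIndex arr_s out) := by unfold Spec_setInveredIndex; infer_instance

-- ===== CLAIM (what is proved, stated in full; the proofs are below) =====
def Claim_equal_setInveredIndex : Prop := ∀ (arr_s : List String), Dom_setInveredIndex arr_s → Spec_setInveredIndex arr_s (setInveredIndex arr_s)

-- ===== LEMMAS AND PROOFS =====

theorem pvKey_inj {c c' : Char} (h : pvKey c = pvKey c') : c = c' := by
  have := congrArg String.toList h
  simpa [pvKey] using this

theorem mem_map_pvKey {c : Char} {l : List Char} : pvKey c ∈ l.map pvKey ↔ c ∈ l := by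
  constructor
  · intro h
    rcases List.mem_map.1 h with ⟨c', hc', he⟩
    exact (pvKey_inj he.symm) ▸ hc'
  · exact fun h => List.mem_map_of_mem h

theorem isIn_pvKey (c : Char) (s : String) :
    PySem.Str.isIn (pvKey c) s = decide (c ∈ s.toList) := by
  rw [Bool.eq_iff_iff]
  simp only [pvKey, PySem.Str.isIn_iff_infix, String.toList_ofList,
    List.singleton_infix_iff, decide_eq_true_iff]

theorem pyGetD_append_left {α : Type} (xs ys : List α) (i : Int) (d : α)
    (h0 : 0 ≤ i) (h1 : i < (xs.length : Int)) :
    PySem.List.pyGetD (xs ++ ys) i d = PySem.List.pyGetD xs i d := by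
  rw [PySem.List.pyGetD_eq_getElem (xs ++ ys) d h0 (by simp; omega),
      PySem.List.pyGetD_eq_getElem xs d h0 h1]
  rw [List.getElem_append_left]

-- get?/contains on a dict literally of the form ⟨K.map (k, g k)⟩
theorem get?_mk_map {g : String → List Int} {K : List String} {k : String}
    (hK : K.Nodup) (hk : k ∈ K) :
    (PySem.Dict.mk (K.map (fun k => (k, g k)))).get? k = some (g k) := by
  apply PySem.Dict.get?_of_mem_items
  · exact List.mem_map_of_mem hk
  · simpa [PySem.Dict.keys_mk, List.map_map, Function.comp_def] using hK

theorem contains_mk_map {ν : Type} {g : String → ν} {K : List String} {k : String} :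
    (PySem.Dict.mk (K.map (fun k => (k, g k)))).contains k = decide (k ∈ K) := by
  rw [PySem.Dict.contains_eq_decide_mem_keys]
  simp [PySem.Dict.keys_mk, List.map_map, Function.comp]

theorem filter_nil_of_not_mem {ds : List String} {c : Char}
    (h : ∀ t ∈ ds, c ∉ t.toList) :
    List.filter (fun i => PySem.Str.isIn (pvKey c) (PySem.List.pyGetD ds i ""))
      (PySem.List.pyRange 0 (ds.length : Int)) = [] := by
  rw [List.filter_eq_nil_iff]
  intro i hi
  have hb := PySem.List.mem_pyRange_one.1 hi
  rw [PySem.List.pyGetD_eq_getElem ds "" hb.1 hb.2, isIn_pvKey]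
  simp only [decide_eq_true_eq]
  exact h _ (List.getElem_mem _)

-- inner loop invariant: folding one document's characters at index i over a dict
-- whose items are K.map (k, f k ++ [i if k already seen in this doc])
theorem inner_loop (i : Int) (cs : List Char) :
    ∀ (K : List String) (f : String → List Int) (S : List String),
    K.Nodup → (∀ k, i ∉ f k) → (∀ k ∈ S, k ∈ K) →
    cs.foldl (setIIStep i)
      (PySem.Dict.mk (K.map (fun k => (k, f k ++ if k ∈ S then [i] else [])))) =
    PySem.Dict.mk ((PySem.Set.update K (cs.map pvKey)).map (fun k =>
      (k, (if k ∈ K then f k else []) ++ if k ∈ S ∨ k ∈ cs.map pvKey then [i] else []))) := by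
  induction cs with
  | nil =>
    intro K f S hK hf hS
    simp only [List.foldl_nil, List.map_nil]
    have hupd : PySem.Set.update K ([] : List String) = K := rfl
    rw [hupd]
    refine congrArg PySem.Dict.mk (List.map_congr_left ?_)
    intro k hk
    simp [hk]
  | cons c cs ih =>
    intro K f S hK hf hS
    simp only [List.foldl_cons, List.map_cons]
    have hupd : PySem.Set.update K (pvKey c :: cs.map pvKey)
        = PySem.Set.update (PySem.Set.add K (pvKey c)) (cs.map pvKey) := rfl
    rw [hupd]
    by_cases hc : pvKey c ∈ K
    · have hadd : PySem.Set.add K (pvKey c) = K := by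
        simp [PySem.Set.add]
        exact hc
      rw [hadd]
      have hcon : (PySem.Dict.mk (K.map (fun k =>
          (k, f k ++ if k ∈ S then [i] else [])))).contains (pvKey c) = true := by
        rw [contains_mk_map]; simp [hc]
      have hget : (PySem.Dict.mk (K.map (fun k =>
          (k, f k ++ if k ∈ S then [i] else [])))).getD (pvKey c) []
          = f (pvKey c) ++ (if pvKey c ∈ S then [i] else []) := by
        simp [PySem.Dict.getD, get?_mk_map hK hc]
      by_cases hs : pvKey c ∈ S
      · have hstep : setIIStep i (PySem.Dict.mk (K.map (fun k =>
            (k, f k ++ if k ∈ S then [i] else [])))) c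
            = PySem.Dict.mk (K.map (fun k => (k, f k ++ if k ∈ S then [i] else []))) := by
          unfold setIIStep
          rw [hcon, hget]
          rw [if_neg (by simp)]
          simp [hs]
        rw [hstep, ih K f S hK hf hS]
        refine congrArg PySem.Dict.mk (List.map_congr_left ?_)
        intro k hk
        by_cases hkc : k = pvKey c <;> simp [hkc, hs]
      · have hstep : setIIStep i (PySem.Dict.mk (K.map (fun k =>
            (k, f k ++ if k ∈ S then [i] else [])))) c
            = PySem.Dict.mk (K.map (fun k =>
                (k, f k ++ if k ∈ pvKey c :: S then [i] else []))) := by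
          unfold setIIStep
          rw [hcon, hget]
          rw [if_neg (by simp)]
          show (if i ∈ f (pvKey c) ++ (if pvKey c ∈ S then [i] else []) then _ else _) = _
          rw [if_neg (by simp [hs, hf (pvKey c)])]
          rw [if_neg hs]
          refine PySem.Dict.ext ?_
          rw [PySem.Dict.items_insert_of_contains _ _ hcon]
          simp only [List.map_map]
          refine List.map_congr_left ?_
          intro k hkK
          by_cases hkc : k = pvKey c
          · simp [Function.comp, hkc, hs]
          · simp [Function.comp, fun h => hkc h]
        rw [hstep, ih K f (pvKey c :: S) hK hf ?hsub]
        case hsub =>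
          intro k hk
          rcases List.mem_cons.1 hk with h | h
          · exact h ▸ hc
          · exact hS k h
        refine congrArg PySem.Dict.mk (List.map_congr_left ?_)
        intro k hk
        by_cases hkc : k = pvKey c <;> simp [hkc]
    · have hadd : PySem.Set.add K (pvKey c) = K ++ [pvKey c] := by
        simp only [PySem.Set.add]
        rw [if_neg]
        simp only [Bool.not_eq_true]
        rw [← Bool.not_eq_true, PySem.Set.contains_iff]
        exact hc
      rw [hadd]
      have hcon : (PySem.Dict.mk (K.map (fun k =>
          (k, f k ++ if k ∈ S then [i] else [])))).contains (pvKey c) = false := by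
        rw [contains_mk_map]; simp [hc]
      have hstep : setIIStep i (PySem.Dict.mk (K.map (fun k =>
          (k, f k ++ if k ∈ S then [i] else [])))) c
          = PySem.Dict.mk ((K ++ [pvKey c]).map (fun k =>
              ((k, (if k = pvKey c then [] else f k) ++
                if k ∈ S ++ [pvKey c] then [i] else [])))) := by
        unfold setIIStep
        rw [hcon]
        rw [if_pos rfl]
        refine PySem.Dict.ext ?_
        rw [PySem.Dict.items_insert_of_not_contains _ _ hcon]
        simp only [List.map_append, List.map_cons, List.map_nil]
        congr 1
        · refine List.map_congr_left ?_
          intro k hkK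
          have hkc : k ≠ pvKey c := fun h => hc (h ▸ hkK)
          simp [hkc]
        · simp
      rw [hstep, ih (K ++ [pvKey c]) (fun k => if k = pvKey c then [] else f k)
            (S ++ [pvKey c]) ?hnd ?hfn ?hsb]
      case hnd =>
        simp [List.nodup_append, hK]
        exact fun a ha h => hc (h ▸ ha)
      case hfn =>
        intro k
        by_cases hkc : k = pvKey c <;> simp [hkc, hf k]
      case hsb =>
        intro k hk
        rcases List.mem_append.1 hk with h | h
        · exact List.mem_append_left _ (hS k h)
        · exact List.mem_append_right _ h
      refine congrArg PySem.Dict.mk (List.map_congr_left ?_)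
      intro k hk
      by_cases hkc : k = pvKey c
      · simp [hkc, hc]
      · simp [hkc]

-- outer loop: A's whole fold produces exactly B's table
theorem outer_loop (ds : List String) :
    (PySem.List.pyRange 0 (PySem.List.len ds) 1).foldl (fun d i =>
        (PySem.List.pyGetD ds i "").toList.foldl (setIIStep i) d) PySem.Dict.empty =
    PySem.Dict.mk ((PySem.List.dedup (ds.flatMap (fun s => s.toList.map pvKey))).map (fun k =>
      (k, (PySem.List.pyRange 0 (PySem.List.len ds) 1).filter
        (fun i => PySem.Str.isIn k (PySem.List.pyGetD ds i ""))))) := by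
  induction ds using List.reverseRecOn with
  | nil => rfl
  | append_singleton ds s ih =>
    have hn : (0 : Int) ≤ (ds.length : Int) := Int.natCast_nonneg _
    have hlen : PySem.List.len (ds ++ [s]) = (ds.length : Int) + 1 := by
      simp [PySem.List.len_eq]
    simp only [PySem.List.len_eq] at ih
    rw [hlen, PySem.List.pyRange_one_succ_right hn, List.foldl_append]
    have hfirst : (PySem.List.pyRange 0 (ds.length : Int) 1).foldl (fun d i =>
          (PySem.List.pyGetD (ds ++ [s]) i "").toList.foldl (setIIStep i) d) PySem.Dict.empty
        = (PySem.List.pyRange 0 (ds.length : Int) 1).foldl (fun d i =>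
          (PySem.List.pyGetD ds i "").toList.foldl (setIIStep i) d) PySem.Dict.empty := by
      apply PySem.List.foldl_congr_mem
      intro acc j hj
      have hb := PySem.List.mem_pyRange_one.1 hj
      rw [pyGetD_append_left ds [s] j "" hb.1 hb.2]
    rw [hfirst, ih]
    have hlast : PySem.List.pyGetD (ds ++ [s]) (ds.length : Int) "" = s := by
      rw [PySem.List.pyGetD_eq_getElem (ds ++ [s]) "" hn (by simp)]
      simp
    simp only [List.foldl_cons, List.foldl_nil]
    rw [hlast]
    have hinner := inner_loop (ds.length : Int) s.toList
      (PySem.List.dedup (List.flatMap (fun t => List.map pvKey t.toList) ds))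
      (fun k => List.filter (fun i => PySem.Str.isIn k (PySem.List.pyGetD ds i ""))
        (PySem.List.pyRange 0 (ds.length : Int)))
      [] (PySem.Set.nodup_ofList _)
      (by
        intro k hmem
        have hb := PySem.List.mem_pyRange_one.1 (List.mem_filter.1 hmem).1
        omega)
      (by intro k hk; simp at hk)
    simp only [List.not_mem_nil, if_false, List.append_nil, false_or] at hinner
    rw [hinner]
    have hkeys : PySem.List.dedup (List.flatMap (fun t => List.map pvKey t.toList) (ds ++ [s]))
        = PySem.Set.update
            (PySem.List.dedup (List.flatMap (fun t => List.map pvKey t.toList) ds))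
            (List.map pvKey s.toList) := by
      simp [PySem.List.dedup, PySem.Set.ofList_eq_foldl, PySem.Set.update,
        List.flatMap_append, List.foldl_append]
    rw [hkeys]
    refine congrArg PySem.Dict.mk (List.map_congr_left ?_)
    intro k hk
    obtain ⟨c, rfl⟩ : ∃ c, k = pvKey c := by
      rcases (PySem.Set.mem_update _ _ _).1 hk with h | h
      · have hfl : k ∈ List.flatMap (fun t => List.map pvKey t.toList) ds := by
          simpa [PySem.List.dedup, PySem.Set.mem_ofList] using h
        rcases List.mem_flatMap.1 hfl with ⟨t, _, hkt⟩
        rcases List.mem_map.1 hkt with ⟨c, _, rfl⟩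
        exact ⟨c, rfl⟩
      · rcases List.mem_map.1 h with ⟨c, _, rfl⟩
        exact ⟨c, rfl⟩
    rw [List.filter_append]
    have hfc : List.filter (fun i => PySem.Str.isIn (pvKey c) (PySem.List.pyGetD (ds ++ [s]) i ""))
          (PySem.List.pyRange 0 (ds.length : Int))
        = List.filter (fun i => PySem.Str.isIn (pvKey c) (PySem.List.pyGetD ds i ""))
          (PySem.List.pyRange 0 (ds.length : Int)) := by
      apply List.filter_congr
      intro j hj
      have hb := PySem.List.mem_pyRange_one.1 hj
      rw [pyGetD_append_left ds [s] j "" hb.1 hb.2]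
    rw [hfc]
    have hsingle : List.filter (fun i => PySem.Str.isIn (pvKey c) (PySem.List.pyGetD (ds ++ [s]) i ""))
          [(ds.length : Int)] = if c ∈ s.toList then [(ds.length : Int)] else [] := by
      simp only [List.filter_cons, List.filter_nil, hlast, isIn_pvKey, decide_eq_true_eq]
    rw [hsingle]
    refine congrArg (fun v => (pvKey c, v)) ?_
    by_cases hmem : pvKey c ∈ PySem.List.dedup (List.flatMap (fun t => List.map pvKey t.toList) ds)
    · rw [if_pos hmem]
      congr 1
      simp [mem_map_pvKey]
    · rw [if_neg hmem]
      have hnil : List.filter (fun i => PySem.Str.isIn (pvKey c) (PySem.List.pyGetD ds i ""))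
          (PySem.List.pyRange 0 (ds.length : Int)) = [] := by
        apply filter_nil_of_not_mem
        intro t ht hct
        apply hmem
        simp only [PySem.List.dedup, PySem.Set.mem_ofList, List.mem_flatMap]
        exact ⟨t, ht, List.mem_map_of_mem hct⟩
      rw [hnil]
      simp [mem_map_pvKey]

-- ===== VERDICT (by name: the statement is the Claim_ definition above) =====
theorem setInveredIndex_spec : Claim_equal_setInveredIndex := by
  intro arr_s _
  unfold Spec_setInveredIndex setInveredIndex setInveredIndex_alt
  rw [outer_loop]
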